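-- pv_equiv track=rewrite | github.com/Tormen/my-uhs | my-uhs.py | parse_text_escapes
-- ===== SOURCE A (Python) =====
-- _ACCENT = {
--     ":": dict(zip("AEIOUaeiou", "ÄËÏÖÜäëïöü")),
--     "'": dict(zip("AEIOUaeiou", "ÁÉÍÓÚáéíóú")),
--     "`": dict(zip("AEIOUaeiou", "ÀÈÌÒÙàèìòù")),
--     "^": dict(zip("AEIOUaeiou", "ÂÊÎÔÛâêîôû")),
--     "~": {"N": "Ñ", "n": "ñ"},
-- }
--
-- def parse_text_escapes(s: str) -> str:
--     """Port of OpenUHSLib.parseTextEscapes. Hyperlink markers (#h+...#h-)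
--     are intentionally preserved verbatim, matching Java's behavior in
--     --print mode."""
--     out = []
--     break_str = " "
--     i = 0
--     n = len(s)
--     while i < n:
--         ch = s[i]
--         # ## → literal #
--         if ch == "#" and i + 1 < n and s[i + 1] == "#":
--             out.append("#")
--             i += 2
--             continue
--         if ch == "#":
--             # accents: #a+X<acc>#a- (8 chars)
--             if i + 7 < n and s[i:i + 3] == "#a+" and s[i + 5:i + 8] == "#a-":
--                 x, acc = s[i + 3], s[i + 4]
--                 m = _ACCENT.get(acc, {}).get(x)
--                 if m is not None:
--                     out.append(m); i += 8; continue
--                 if x == "a" and acc == "e":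
--                     out.append("æ"); i += 8; continue
--                 if x == "T" and acc == "M":
--                     out.append("™"); i += 8; continue
--                 # fall through — emit '#' literally
--             # whitespace mode toggles
--             if i + 2 < n:
--                 tri = s[i:i + 3]
--                 if tri in ("#w+", "#w."):
--                     break_str = " "; i += 3; continue
--                 if tri == "#w-":
--                     break_str = "\n"; i += 3; continue
--         # ^break^ — sub the current break_str
--         if ch == "^" and s[i:i + 7] == "^break^":
--             out.append(break_str); i += 7; continue
--         out.append(ch)
--         i += 1
--     return "".join(out)
-- ===== SOURCE B (Python) =====
-- # B: replaces A's char-by-char scanner with a hierarchical split pipeline: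
-- # the text is cut on "##" (literal '#'), each segment on "#a+" (accents),
-- # each piece on "^break^" (break substitution), each chunk on "#w" (mode
-- # toggles); every escape is then decided by looking at the head of the
-- # following fragment, so no per-character state machine remains.
-- _ACCENT_B = {
--     ":": dict(zip("AEIOUaeiou", "ÄËÏÖÜäëïöü")),
--     "'": dict(zip("AEIOUaeiou", "ÁÉÍÓÚáéíóú")),
--     "`": dict(zip("AEIOUaeiou", "ÀÈÌÒÙàèìòù")),
--     "^": dict(zip("AEIOUaeiou", "ÂÊÎÔÛâêîôû")),
--     "~": {"N": "Ñ", "n": "ñ"},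
-- }
-- _LIGATURE_B = {"ae": "æ", "TM": "™"}
--
--
-- def _acc_char(p):
--     """Accented char encoded by the piece following '#a+', or None."""
--     if p[2:5] != "#a-":
--         return None
--     m = _ACCENT_B.get(p[1:2], {}).get(p[0:1])
--     if m is None:
--         m = _LIGATURE_B.get(p[0:2])
--     return m
--
--
-- def parse_text_escapes(s: str) -> str:
--     break_str = " "
--
--     def toggles(t):
--         nonlocal break_str
--         first, *rest = t.split("#w")
--         out = [first]
--         for p in rest:
--             sign = p[:1]
--             if sign == "+" or sign == ".":
--                 break_str = " "
--                 out.append(p[1:])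
--             elif sign == "-":
--                 break_str = "\n"
--                 out.append(p[1:])
--             else:
--                 out.append("#w")
--                 out.append(p)
--         return "".join(out)
--
--     def breaks(t):
--         first, *rest = t.split("^break^")
--         out = [toggles(first)]
--         for c in rest:
--             out.append(break_str)
--             out.append(toggles(c))
--         return "".join(out)
--
--     def accents(t):
--         first, *rest = t.split("#a+")
--         out = [breaks(first)]
--         for p in rest:
--             m = _acc_char(p)
--             if m is not None:
--                 out.append(m)
--                 out.append(breaks(p[5:]))
--             else:
--                 out.append("#a+")
--                 out.append(breaks(p))
--         return "".join(out)
--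
--     return "#".join([accents(seg) for seg in s.split("##")])
-- ===== Notes on version B (the rewrite author's own statement) =====
-- stated objective: faster
-- what changed: replaces the stateful char-by-char scanner with a hierarchical split pipeline: the text is cut on "##", segments on "#a+", pieces on "^break^", chunks on "#w", and each escape is decided from the head of the following fragment
import Mathlib
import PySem

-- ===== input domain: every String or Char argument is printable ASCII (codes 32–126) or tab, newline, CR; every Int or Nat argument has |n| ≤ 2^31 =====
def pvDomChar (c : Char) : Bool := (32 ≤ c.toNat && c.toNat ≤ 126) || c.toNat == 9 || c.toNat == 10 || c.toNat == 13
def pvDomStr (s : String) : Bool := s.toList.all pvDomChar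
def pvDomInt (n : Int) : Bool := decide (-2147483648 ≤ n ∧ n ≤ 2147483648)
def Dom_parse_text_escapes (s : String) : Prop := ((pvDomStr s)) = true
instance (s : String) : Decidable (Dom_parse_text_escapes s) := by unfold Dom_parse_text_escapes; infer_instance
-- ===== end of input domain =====

-- B rewrites A's char-by-char scanner as a hierarchical split pipeline ("##", then
-- "#a+", then "^break^", then "#w"); same return value, measured faster by the
-- timing run (constant factor: bulk split/join instead of a per-char state machine).

-- ===== PORT A =====
-- _ACCENT[acc].get(x) — the module-level accent table (shared verbatim by both Pythons)
def pvAccLookup (a x : Char) : Option Char :=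
  match a, x with
  | ':', 'A' => some 'Ä'
  | ':', 'E' => some 'Ë'
  | ':', 'I' => some 'Ï'
  | ':', 'O' => some 'Ö'
  | ':', 'U' => some 'Ü'
  | ':', 'a' => some 'ä'
  | ':', 'e' => some 'ë'
  | ':', 'i' => some 'ï'
  | ':', 'o' => some 'ö'
  | ':', 'u' => some 'ü'
  | '\'', 'A' => some 'Á'
  | '\'', 'E' => some 'É'
  | '\'', 'I' => some 'Í'
  | '\'', 'O' => some 'Ó'
  | '\'', 'U' => some 'Ú'
  | '\'', 'a' => some 'á'
  | '\'', 'e' => some 'é'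
  | '\'', 'i' => some 'í'
  | '\'', 'o' => some 'ó'
  | '\'', 'u' => some 'ú'
  | '`', 'A' => some 'À'
  | '`', 'E' => some 'È'
  | '`', 'I' => some 'Ì'
  | '`', 'O' => some 'Ò'
  | '`', 'U' => some 'Ù'
  | '`', 'a' => some 'à'
  | '`', 'e' => some 'è'
  | '`', 'i' => some 'ì'
  | '`', 'o' => some 'ò'
  | '`', 'u' => some 'ù'
  | '^', 'A' => some 'Â'
  | '^', 'E' => some 'Ê'
  | '^', 'I' => some 'Î'
  | '^', 'O' => some 'Ô'
  | '^', 'U' => some 'Û'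
  | '^', 'a' => some 'â'
  | '^', 'e' => some 'ê'
  | '^', 'i' => some 'î'
  | '^', 'o' => some 'ô'
  | '^', 'u' => some 'û'
  | '~', 'N' => some 'Ñ'
  | '~', 'n' => some 'ñ'
  | _, _ => none

-- A's three accent checks in order: table lookup, then "ae" → 'æ', then "TM" → '™'
def pvAccA (x a : Char) : Option Char :=
  match pvAccLookup a x with
  | some m => some m
  | none =>
    if x = 'a' ∧ a = 'e' then some 'æ'
    else if x = 'T' ∧ a = 'M' then some '™'
    else none

-- the while-loop of A, one recursion step per loop iteration; the branch order and
-- the consumed lengths (2 / 8 / 3 / 7 / 1) are exactly A's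
def pvScanA : List Char → Char → List Char
  | [], _ => []
  | '#' :: '#' :: t, b => '#' :: pvScanA t b
  | '#' :: r@('a' :: '+' :: x :: a :: '#' :: 'a' :: '-' :: t), b =>
    (match pvAccA x a with
     | some m => m :: pvScanA t b
     | none => '#' :: pvScanA r b)   -- fall through: "#a+" is no toggle → literal '#', i += 1
  | '#' :: 'w' :: '+' :: t, _ => pvScanA t ' '
  | '#' :: 'w' :: '.' :: t, _ => pvScanA t ' '
  | '#' :: 'w' :: '-' :: t, _ => pvScanA t '\n'
  | '^' :: 'b' :: 'r' :: 'e' :: 'a' :: 'k' :: '^' :: t, b => b :: pvScanA t b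
  | c :: t, b => c :: pvScanA t b

def parse_text_escapes (s : String) : String := String.mk (pvScanA s.toList ' ')

-- ===== PORT B =====
-- _acc_char of Source B: trailer check "#a-", then _ACCENT_B lookup, then _LIGATURE_B
def pvAccB (p : List Char) : Option Char :=
  if (p.drop 2).take 3 = ['#', 'a', '-'] then
    match p with
    | x :: a :: _ =>
      (match pvAccLookup a x with
       | some m => some m
       | none => if x = 'a' ∧ a = 'e' then some 'æ'
                 else if x = 'T' ∧ a = 'M' then some '™' else none)
    | _ => none   -- unreachable: the trailer check forces length ≥ 5
  else none

-- the for-loop of toggles(): pieces after each "#w", head char decides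
def pvTogLoop : List (List Char) → Char → List Char × Char
  | [], b => ([], b)
  | p :: ps, b =>
    if p.take 1 = ['+'] ∨ p.take 1 = ['.'] then
      let (o, b') := pvTogLoop ps ' '
      (p.drop 1 ++ o, b')
    else if p.take 1 = ['-'] then
      let (o, b') := pvTogLoop ps '\n'
      (p.drop 1 ++ o, b')
    else
      let (o, b') := pvTogLoop ps b
      ('#' :: 'w' :: p ++ o, b')

def pvToggles (t : List Char) (b : Char) : List Char × Char :=
  match PySem.Chars.splitOn t ['#', 'w'] with
  | [] => ([], b)   -- unreachable: split never returns []
  | f :: rest =>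
    let (o, b') := pvTogLoop rest b
    (f ++ o, b')

-- the for-loop of breaks(): current break_str before each later chunk
def pvBrkLoop : List (List Char) → Char → List Char × Char
  | [], b => ([], b)
  | c :: cs, b =>
    let (o, b') := pvToggles c b
    let (o2, b2) := pvBrkLoop cs b'
    (b :: (o ++ o2), b2)

def pvBreaks (t : List Char) (b : Char) : List Char × Char :=
  match PySem.Chars.splitOn t ['^', 'b', 'r', 'e', 'a', 'k', '^'] with
  | [] => ([], b)
  | f :: rest =>
    let (o, b') := pvToggles f b
    let (o2, b2) := pvBrkLoop rest b'
    (o ++ o2, b2)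

-- the for-loop of accents(): pieces after each "#a+"
def pvAccLoop : List (List Char) → Char → List Char × Char
  | [], b => ([], b)
  | p :: ps, b =>
    match pvAccB p with
    | some m =>
      let (o, b') := pvBreaks (p.drop 5) b
      let (o2, b2) := pvAccLoop ps b'
      (m :: (o ++ o2), b2)
    | none =>
      let (o, b') := pvBreaks p b
      let (o2, b2) := pvAccLoop ps b'
      ('#' :: 'a' :: '+' :: (o ++ o2), b2)

def pvAccents (t : List Char) (b : Char) : List Char × Char :=
  match PySem.Chars.splitOn t ['#', 'a', '+'] with
  | [] => ([], b)
  | f :: rest =>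
    let (o, b') := pvBreaks f b
    let (o2, b2) := pvAccLoop rest b'
    (o ++ o2, b2)

-- "#".join over the "##" segments, threading break_str left to right
def pvSegLoop : List (List Char) → Char → List Char × Char
  | [], b => ([], b)
  | p :: ps, b =>
    let (o, b') := pvAccents p b
    let (o2, b2) := pvSegLoop ps b'
    ('#' :: (o ++ o2), b2)

def pvTop (s : List Char) (b : Char) : List Char × Char :=
  match PySem.Chars.splitOn s ['#', '#'] with
  | [] => ([], b)
  | f :: rest =>
    let (o, b') := pvAccents f b
    let (o2, b2) := pvSegLoop rest b'
    (o ++ o2, b2)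

def parse_text_escapes_alt (s : String) : String := String.mk (pvTop s.toList ' ').1

-- ===== PRECONDITION & SPEC =====
def Spec_parse_text_escapes (s : String) (out : String) : Prop := out = parse_text_escapes_alt s
instance (s : String) (out : String) : Decidable (Spec_parse_text_escapes s out) := by unfold Spec_parse_text_escapes; infer_instance

-- ===== CLAIM (what is proved, stated in full; the proofs are below) =====
def Claim_equal_parse_text_escapes : Prop := ∀ (s : String), Dom_parse_text_escapes s → Spec_parse_text_escapes s (parse_text_escapes s)

-- ===== LEMMAS AND PROOFS =====

-- leftmost occurrence of sep: the clean recursion the fuel-based splitOn is bridged to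
def pvBreakOn (sep : List Char) : List Char → Option (List Char × List Char)
  | [] => none
  | c :: t =>
    if sep.isPrefixOf (c :: t) then some ([], (c :: t).drop sep.length)
    else
      match pvBreakOn sep t with
      | some (h, r) => some (c :: h, r)
      | none => none

theorem pvBreakOn_length {sep : List Char} (hs : sep ≠ []) :
    ∀ {s h r}, pvBreakOn sep s = some (h, r) → r.length < s.length := by
  intro s
  induction s with
  | nil => intro h r hbr; simp [pvBreakOn] at hbr
  | cons c t ih =>
    intro h r hbr
    rw [pvBreakOn] at hbr
    split at hbr
    · have hsep : 1 ≤ sep.length := by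
        cases sep with | nil => exact absurd rfl hs | cons a l => simp
      have hr : r = (c :: t).drop sep.length := by
        cases hbr; rfl
      subst hr
      simp only [List.length_drop, List.length_cons]
      omega
    · cases hbo : pvBreakOn sep t with
      | none => rw [hbo] at hbr; simp at hbr
      | some pr =>
        obtain ⟨h', r'⟩ := pr
        rw [hbo] at hbr
        simp only [Option.some.injEq, Prod.mk.injEq] at hbr
        have := ih (h := h') (r := r') hbo
        have hr : r = r' := hbr.2.symm
        subst hr
        simp only [List.length_cons]
        omega

def pvSplit (sep : List Char) (hs : sep ≠ []) (s : List Char) : List (List Char) :=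
  match hbr : pvBreakOn sep s with
  | none => [s]
  | some (h, r) => h :: pvSplit sep hs r
termination_by s.length
decreasing_by exact pvBreakOn_length hs hbr

theorem pvSplit_ne_nil {sep : List Char} (hs : sep ≠ []) (s : List Char) :
    pvSplit sep hs s ≠ [] := by
  rw [pvSplit]
  split <;> simp

-- bridge: PySem.Chars.splitOn is pvSplit
theorem pvModifyHead_id (l : List (List Char)) :
    l.modifyHead (fun x => x) = l := by
  cases l <;> simp

theorem pvSplit_eq_some {sep : List Char} (hs : sep ≠ []) {s h r : List Char}
    (hbo : pvBreakOn sep s = some (h, r)) :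
    pvSplit sep hs s = h :: pvSplit sep hs r := by
  rw [pvSplit]
  split
  · rename_i heq; rw [heq] at hbo; cases hbo
  · rename_i h' r' heq; rw [heq] at hbo
    cases hbo; rfl

theorem pvSplit_eq_none {sep : List Char} (hs : sep ≠ []) {s : List Char}
    (hbo : pvBreakOn sep s = none) :
    pvSplit sep hs s = [s] := by
  rw [pvSplit]
  split
  · rfl
  · rename_i h' r' heq; rw [heq] at hbo; cases hbo

theorem pvSplitOn_go_eq {sep : List Char} (hs : sep ≠ []) :
    ∀ fuel l cur acc, l.length < fuel →
      PySem.Chars.splitOn.go sep fuel l cur acc =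
        acc.reverse ++ (pvSplit sep hs l).modifyHead (cur.reverse ++ ·) := by
  have hsep : 1 ≤ sep.length := by
    cases sep with | nil => exact absurd rfl hs | cons a l => simp
  intro fuel
  induction fuel with
  | zero => intro l cur acc h; omega
  | succ fuel ih =>
    intro l cur acc h
    cases l with
    | nil =>
      rw [pvSplit_eq_none hs (by rw [pvBreakOn])]
      rw [PySem.Chars.splitOn.go.eq_def]
      simp
    | cons c rest =>
      rw [PySem.Chars.splitOn.go.eq_def]
      simp only []
      by_cases hpre : sep.isPrefixOf (c :: rest) = true
      · simp only [hpre, if_true]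
        have hlen : ((c :: rest).drop sep.length).length < fuel := by
          simp only [List.length_drop, List.length_cons]
          simp only [List.length_cons] at h
          omega
        rw [ih _ [] _ hlen]
        rw [pvSplit_eq_some hs (s := c :: rest)
            (by rw [pvBreakOn, if_pos hpre])]
        simp [pvModifyHead_id, List.append_assoc]
      · simp only [hpre, if_false, Bool.false_eq_true]
        have hlen : rest.length < fuel := by
          simp only [List.length_cons] at h; omega
        rw [ih rest (c :: cur) acc hlen]
        cases hbo : pvBreakOn sep rest with
        | none =>
          rw [pvSplit_eq_none hs (s := c :: rest)
              (by rw [pvBreakOn, if_neg hpre, hbo])]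
          rw [pvSplit_eq_none hs hbo]
          simp
        | some pr =>
          obtain ⟨hd, r⟩ := pr
          rw [pvSplit_eq_some hs (s := c :: rest)
              (by rw [pvBreakOn, if_neg hpre, hbo])]
          rw [pvSplit_eq_some hs hbo]
          simp [List.append_assoc]

theorem pvSplitOn_eq {sep : List Char} (hs : sep ≠ []) (s : List Char) :
    PySem.Chars.splitOn s sep = pvSplit sep hs s := by
  rw [PySem.Chars.splitOn, pvSplitOn_go_eq hs (s.length + 1) s [] [] (by omega)]
  simp [pvModifyHead_id]

-- reconstruction and leftmostness of pvBreakOn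
theorem pvBreakOn_some_eq {sep s h r : List Char} (hbr : pvBreakOn sep s = some (h, r)) :
    s = h ++ sep ++ r := by
  induction s generalizing h r with
  | nil => simp [pvBreakOn] at hbr
  | cons c t ih =>
    rw [pvBreakOn] at hbr
    split at hbr
    · rename_i hpre
      obtain ⟨w, hw⟩ := List.isPrefixOf_iff_prefix.mp hpre
      cases hbr
      simp [← hw, List.drop_left]
    · rename_i hpre
      cases hbo : pvBreakOn sep t with
      | none => rw [hbo] at hbr; cases hbr
      | some pr =>
        obtain ⟨h', r'⟩ := pr
        rw [hbo] at hbr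
        cases hbr
        simpa using ih hbo

-- split of a string whose first u.length positions carry no sep occurrence
theorem pvBreakOn_append_front {sep u v : List Char}
    (hu : ∀ i < u.length, ¬ sep.isPrefixOf ((u ++ v).drop i)) :
    pvBreakOn sep (u ++ v) = (pvBreakOn sep v).map (fun p => (u ++ p.1, p.2)) := by
  induction u with
  | nil =>
    simp only [List.nil_append]
    cases hbo : pvBreakOn sep v with
    | none => simp
    | some pr => obtain ⟨h, r⟩ := pr; simp
  | cons c u' ih =>
    have h0 : ¬ sep.isPrefixOf (c :: (u' ++ v)) := by
      have := hu 0 (by simp)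
      simpa using this
    rw [List.cons_append, pvBreakOn, if_neg h0]
    have hu' : ∀ i < u'.length, ¬ sep.isPrefixOf ((u' ++ v).drop i) := by
      intro i hi
      have := hu (i + 1) (by simp; omega)
      simpa using this
    rw [ih hu']
    cases hbo : pvBreakOn sep v with
    | none => simp
    | some pr => obtain ⟨h, r⟩ := pr; simp

theorem pvSplit_append_front {sep : List Char} (hs : sep ≠ []) {u v : List Char}
    (hu : ∀ i < u.length, ¬ sep.isPrefixOf ((u ++ v).drop i)) :
    pvSplit sep hs (u ++ v) = (pvSplit sep hs v).modifyHead (u ++ ·) := by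
  cases hbo : pvBreakOn sep v with
  | none =>
    rw [pvSplit_eq_none hs (by rw [pvBreakOn_append_front hu, hbo]; rfl)]
    rw [pvSplit_eq_none hs hbo]
    simp
  | some pr =>
    obtain ⟨h, r⟩ := pr
    rw [pvSplit_eq_some hs (s := u ++ v) (h := u ++ h) (r := r)
        (by rw [pvBreakOn_append_front hu, hbo]; rfl)]
    rw [pvSplit_eq_some hs hbo]
    simp

theorem pvIsPrefixOf_append (sep t : List Char) : sep.isPrefixOf (sep ++ t) = true := by
  rw [List.isPrefixOf_iff_prefix]
  exact ⟨t, rfl⟩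

theorem pvSplit_sep_prefix {sep : List Char} (hs : sep ≠ []) (t : List Char) :
    pvSplit sep hs (sep ++ t) = [] :: pvSplit sep hs t := by
  have hbo : pvBreakOn sep (sep ++ t) = some ([], t) := by
    cases sep with
    | nil => exact absurd rfl hs
    | cons a l =>
      rw [List.cons_append, pvBreakOn,
        if_pos (by rw [← List.cons_append]; exact pvIsPrefixOf_append _ t)]
      rw [← List.cons_append]
      simp [List.drop_left]
  rw [pvSplit_eq_some hs hbo]

theorem pvSplit_head_prefix {sep : List Char} (hs : sep ≠ []) {s f : List Char}
    {rest : List (List Char)} (h : pvSplit sep hs s = f :: rest) : f <+: s := by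
  cases hbo : pvBreakOn sep s with
  | none =>
    rw [pvSplit_eq_none hs hbo] at h
    cases h
    exact List.prefix_refl s
  | some pr =>
    obtain ⟨hd, r⟩ := pr
    rw [pvSplit_eq_some hs hbo] at h
    cases h
    rw [pvBreakOn_some_eq hbo]
    exact ⟨sep ++ r, by simp⟩

-- nonempty separators and the splitOn bridge, once per level
theorem pvNeH : (['#','#'] : List Char) ≠ [] := by decide
theorem pvNeA : (['#','a','+'] : List Char) ≠ [] := by decide
theorem pvNeB : (['^','b','r','e','a','k','^'] : List Char) ≠ [] := by decide
theorem pvNeW : (['#','w'] : List Char) ≠ [] := by decide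

theorem pvSplitH (t : List Char) : PySem.Chars.splitOn t ['#','#'] = pvSplit ['#','#'] pvNeH t := pvSplitOn_eq pvNeH t
theorem pvSplitA (t : List Char) : PySem.Chars.splitOn t ['#','a','+'] = pvSplit ['#','a','+'] pvNeA t := pvSplitOn_eq pvNeA t
theorem pvSplitB (t : List Char) : PySem.Chars.splitOn t ['^','b','r','e','a','k','^'] = pvSplit ['^','b','r','e','a','k','^'] pvNeB t := pvSplitOn_eq pvNeB t
theorem pvSplitW (t : List Char) : PySem.Chars.splitOn t ['#','w'] = pvSplit ['#','w'] pvNeW t := pvSplitOn_eq pvNeW t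

theorem pvSplit_nil {sep : List Char} (hs : sep ≠ []) : pvSplit sep hs [] = [[]] :=
  pvSplit_eq_none hs rfl

theorem pvToggles_nil (b : Char) : pvToggles [] b = ([], b) := by
  simp [pvToggles, pvSplitW, pvSplit_nil, pvTogLoop]

theorem pvBreaks_nil (b : Char) : pvBreaks [] b = ([], b) := by
  simp [pvBreaks, pvSplitB, pvSplit_nil, pvBrkLoop, pvToggles_nil]

theorem pvAccents_nil (b : Char) : pvAccents [] b = ([], b) := by
  simp [pvAccents, pvSplitA, pvSplit_nil, pvAccLoop, pvBreaks_nil]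

theorem pvSplit_cons (sep : List Char) (hs : sep ≠ []) (t : List Char) :
    ∃ f rest, pvSplit sep hs t = f :: rest ∧ f <+: t := by
  cases h : pvSplit sep hs t with
  | nil => exact absurd h (pvSplit_ne_nil hs t)
  | cons f rest => exact ⟨f, rest, rfl, pvSplit_head_prefix hs h⟩

theorem pvPrefix_drop_mono {x y : List Char} (h : x <+: y) (i : ℕ) {sep : List Char}
    (hp : sep.isPrefixOf (x.drop i) = true) : sep.isPrefixOf (y.drop i) = true := by
  obtain ⟨z, rfl⟩ := h
  by_cases hi : i ≤ x.length
  · rw [List.drop_append_of_le_length hi]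
    rw [List.isPrefixOf_iff_prefix] at hp ⊢
    exact hp.trans (List.prefix_append _ z)
  · rw [List.drop_eq_nil_of_le (by omega)] at hp
    rw [List.isPrefixOf_iff_prefix] at hp ⊢
    rw [List.prefix_nil.mp hp]
    exact List.nil_prefix
theorem pvBlocks_mono {sep u t f : List Char} (hf : f <+: t)
    (hu : ∀ i < u.length, ¬ sep.isPrefixOf ((u ++ t).drop i)) :
    ∀ i < u.length, ¬ sep.isPrefixOf ((u ++ f).drop i) := by
  intro i hi hp
  exact hu i hi (pvPrefix_drop_mono ((List.prefix_append_right_inj u).mpr hf) i hp)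

-- literal pass-through at the toggles level
theorem pvG_tog {u t : List Char} (b : Char)
    (hu : ∀ i < u.length, ¬ (['#','w'] : List Char).isPrefixOf ((u ++ t).drop i)) :
    pvToggles (u ++ t) b = (u ++ (pvToggles t b).1, (pvToggles t b).2) := by
  obtain ⟨f, rest, hft, hf⟩ := pvSplit_cons ['#','w'] pvNeW t
  have hsp : pvSplit ['#','w'] pvNeW (u ++ t) = (u ++ f) :: rest := by
    rw [pvSplit_append_front pvNeW hu, hft]; rfl
  simp only [pvToggles, pvSplitW, hsp, hft]
  cases hy : pvTogLoop rest b with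
  | mk o2 b2 => simp [List.append_assoc]

-- one inner step lifted through the ^break^ level
theorem pvLift_tog_brk {u t : List Char} {e : Char → List Char} {σ : Char → Char}
    (hu : ∀ i < u.length, ¬ (['^','b','r','e','a','k','^'] : List Char).isPrefixOf ((u ++ t).drop i))
    (hstep : ∀ f b, f <+: t →
      pvToggles (u ++ f) b = (e b ++ (pvToggles f (σ b)).1, (pvToggles f (σ b)).2)) :
    ∀ b, pvBreaks (u ++ t) b = (e b ++ (pvBreaks t (σ b)).1, (pvBreaks t (σ b)).2) := by
  intro b
  obtain ⟨f, rest, hft, hf⟩ := pvSplit_cons ['^','b','r','e','a','k','^'] pvNeB t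
  have hsp : pvSplit ['^','b','r','e','a','k','^'] pvNeB (u ++ t) = (u ++ f) :: rest := by
    rw [pvSplit_append_front pvNeB hu, hft]; rfl
  simp only [pvBreaks, pvSplitB, hsp, hft]
  rw [hstep f b hf]
  cases hx : pvToggles f (σ b) with
  | mk o b' =>
    cases hy : pvBrkLoop rest b' with
    | mk o2 b2 => simp [List.append_assoc]

-- one inner step lifted through the #a+ level
theorem pvLift_brk_acc {u t : List Char} {e : Char → List Char} {σ : Char → Char}
    (hu : ∀ i < u.length, ¬ (['#','a','+'] : List Char).isPrefixOf ((u ++ t).drop i))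
    (hstep : ∀ f b, f <+: t →
      pvBreaks (u ++ f) b = (e b ++ (pvBreaks f (σ b)).1, (pvBreaks f (σ b)).2)) :
    ∀ b, pvAccents (u ++ t) b = (e b ++ (pvAccents t (σ b)).1, (pvAccents t (σ b)).2) := by
  intro b
  obtain ⟨f, rest, hft, hf⟩ := pvSplit_cons ['#','a','+'] pvNeA t
  have hsp : pvSplit ['#','a','+'] pvNeA (u ++ t) = (u ++ f) :: rest := by
    rw [pvSplit_append_front pvNeA hu, hft]; rfl
  simp only [pvAccents, pvSplitA, hsp, hft]
  rw [hstep f b hf]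
  cases hx : pvBreaks f (σ b) with
  | mk o b' =>
    cases hy : pvAccLoop rest b' with
    | mk o2 b2 => simp [List.append_assoc]

-- one inner step lifted through the ## level
theorem pvLift_acc_top {u t : List Char} {e : Char → List Char} {σ : Char → Char}
    (hu : ∀ i < u.length, ¬ (['#','#'] : List Char).isPrefixOf ((u ++ t).drop i))
    (hstep : ∀ f b, f <+: t →
      pvAccents (u ++ f) b = (e b ++ (pvAccents f (σ b)).1, (pvAccents f (σ b)).2)) :
    ∀ b, pvTop (u ++ t) b = (e b ++ (pvTop t (σ b)).1, (pvTop t (σ b)).2) := by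
  intro b
  obtain ⟨f, rest, hft, hf⟩ := pvSplit_cons ['#','#'] pvNeH t
  have hsp : pvSplit ['#','#'] pvNeH (u ++ t) = (u ++ f) :: rest := by
    rw [pvSplit_append_front pvNeH hu, hft]; rfl
  simp only [pvTop, pvSplitH, hsp, hft]
  rw [hstep f b hf]
  cases hx : pvAccents f (σ b) with
  | mk o b' =>
    cases hy : pvSegLoop rest b' with
    | mk o2 b2 => simp [List.append_assoc]

-- B consumes a literal run u touched by no escape
theorem pvP_lit {u t : List Char} (b : Char)
    (hH : ∀ i < u.length, ¬ (['#','#'] : List Char).isPrefixOf ((u ++ t).drop i))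
    (hA : ∀ i < u.length, ¬ (['#','a','+'] : List Char).isPrefixOf ((u ++ t).drop i))
    (hB : ∀ i < u.length, ¬ (['^','b','r','e','a','k','^'] : List Char).isPrefixOf ((u ++ t).drop i))
    (hW : ∀ i < u.length, ¬ (['#','w'] : List Char).isPrefixOf ((u ++ t).drop i)) :
    pvTop (u ++ t) b = (u ++ (pvTop t b).1, (pvTop t b).2) :=
  pvLift_acc_top (e := fun _ => u) (σ := fun b => b) hH
    (fun f bb hf => pvLift_brk_acc (e := fun _ => u) (σ := fun b => b) (pvBlocks_mono hf hA)
      (fun g bb2 hg => pvLift_tog_brk (e := fun _ => u) (σ := fun b => b)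
        (pvBlocks_mono (hg.trans hf) hB)
        (fun w bb3 hw => pvG_tog bb3 (pvBlocks_mono ((hw.trans hg).trans hf) hW)) bb2) bb) b

-- ===== token-step facts for B =====

theorem pvTop_nil (b : Char) : pvTop [] b = ([], b) := by
  simp [pvTop, pvSplitH, pvSplit_nil, pvSegLoop, pvAccents_nil]

theorem pvTake1_prefix {f r : List Char} {c : Char} (hf : f <+: r) (h : f.take 1 = [c]) :
    r.take 1 = [c] := by
  obtain ⟨z, rfl⟩ := hf
  cases f with
  | nil => simp at h
  | cons x f' => simpa using h

-- "##" : a literal '#'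
theorem pvP_hash (t : List Char) (b : Char) :
    pvTop (['#','#'] ++ t) b = ('#' :: (pvTop t b).1, (pvTop t b).2) := by
  have h1 := pvSplit_sep_prefix pvNeH t
  obtain ⟨f, rest, hft, hf⟩ := pvSplit_cons ['#','#'] pvNeH t
  rw [hft] at h1
  simp only [pvTop, pvSplitH, h1, hft, pvAccents_nil]
  cases hx : pvAccents f b with
  | mk o b' =>
    cases hy : pvSegLoop rest b' with
    | mk o2 b2 => simp [pvSegLoop, hx, hy]

-- "#w±" at the toggles level
theorem pvK_tog {c bn : Char} (hc : ((c = '+' ∨ c = '.') ∧ bn = ' ') ∨ (c = '-' ∧ bn = '\n')) :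
    ∀ f b, pvToggles (['#','w',c] ++ f) b = ([] ++ (pvToggles f bn).1, (pvToggles f bn).2) := by
  intro f b
  have hc' : c ≠ '#' := by
    rcases hc with ⟨h | h, _⟩ | ⟨h, _⟩ <;> subst h <;> decide
  have h1 := pvSplit_sep_prefix pvNeW (c :: f)
  simp only [List.cons_append, List.nil_append] at h1
  obtain ⟨f1, rest1, hft, hf⟩ := pvSplit_cons ['#','w'] pvNeW f
  have h2 : pvSplit ['#','w'] pvNeW (c :: f) = (c :: f1) :: rest1 := by
    have hb : ∀ i < ([c] : List Char).length,
        ¬ (['#','w'] : List Char).isPrefixOf (([c] ++ f).drop i) := by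
      intro i hi
      simp only [List.length_cons, List.length_nil] at hi
      interval_cases i
      intro hp
      obtain ⟨z, hz⟩ := List.isPrefixOf_iff_prefix.mp hp
      simp only [List.nil_append, List.cons_append, List.drop_zero, List.cons.injEq] at hz
      exact hc' hz.1.symm
    have := pvSplit_append_front pvNeW hb
    simp only [List.cons_append, List.nil_append] at this
    rw [this, hft]
    rfl
  rw [h2] at h1
  simp only [List.cons_append, List.nil_append]
  simp only [pvToggles, pvSplitW, h1, hft]
  rcases hc with ⟨h | h, hb⟩ | ⟨h, hb⟩ <;> subst h <;> subst hb <;>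
    · cases hy : pvTogLoop rest1 _ with
      | mk o2 b2 => simp [pvTogLoop, hy]

-- "^break^" at the breaks level
theorem pvK_brk : ∀ (t : List Char) (b : Char),
    pvBreaks (['^','b','r','e','a','k','^'] ++ t) b = ([b] ++ (pvBreaks t b).1, (pvBreaks t b).2) := by
  intro t b
  have h1 := pvSplit_sep_prefix pvNeB t
  obtain ⟨f, rest, hft, hf⟩ := pvSplit_cons ['^','b','r','e','a','k','^'] pvNeB t
  rw [hft] at h1
  simp only [pvBreaks, pvSplitB, h1, hft, pvToggles_nil]
  cases hx : pvToggles f b with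
  | mk o b' =>
    cases hy : pvBrkLoop rest b' with
    | mk o2 b2 => simp [pvBrkLoop, hx, hy]

-- accents: the table decides the piece head
theorem pvAccB_shape (x a : Char) (r : List Char) :
    pvAccB (x :: a :: '#' :: 'a' :: '-' :: r) = pvAccA x a := by
  simp [pvAccB, pvAccA]

theorem pvAccA_ne {x a : Char} {m : Char} (h : pvAccA x a = some m) : x ≠ '#' ∧ a ≠ '#' := by
  unfold pvAccA at h
  cases hl : pvAccLookup a x with
  | some m' =>
    unfold pvAccLookup at hl
    split at hl <;> simp_all <;> decide
  | none =>
    rw [hl] at h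
    simp only [] at h
    split_ifs at h with h1 h2
    · obtain ⟨rfl, rfl⟩ := h1; decide
    · obtain ⟨rfl, rfl⟩ := h2; decide

theorem pvK_accV {x a m : Char} (hm : pvAccA x a = some m) :
    ∀ (t : List Char) (b : Char),
      pvAccents (['#','a','+',x,a,'#','a','-'] ++ t) b = ([m] ++ (pvAccents t b).1, (pvAccents t b).2) := by
  intro t b
  have h1 := pvSplit_sep_prefix pvNeA ([x,a,'#','a','-'] ++ t)
  simp only [List.cons_append, List.nil_append] at h1
  obtain ⟨f1, rest1, hft, hf⟩ := pvSplit_cons ['#','a','+'] pvNeA t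
  have h2 : pvSplit ['#','a','+'] pvNeA ([x,a,'#','a','-'] ++ t) = (x :: a :: '#' :: 'a' :: '-' :: f1) :: rest1 := by
    have hb : ∀ i < ([x,a,'#','a','-'] : List Char).length,
        ¬ (['#','a','+'] : List Char).isPrefixOf (([x,a,'#','a','-'] ++ t).drop i) := by
      intro i hi
      simp only [List.length_cons, List.length_nil] at hi
      interval_cases i <;> simp [List.isPrefixOf]
    rw [pvSplit_append_front pvNeA hb, hft]
    rfl
  simp only [List.cons_append, List.nil_append] at h2
  rw [h2] at h1
  simp only [List.cons_append, List.nil_append]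
  simp only [pvAccents, pvSplitA, h1, hft, pvBreaks_nil]
  rw [pvAccLoop]
  simp only [pvAccB_shape, hm, List.drop_succ_cons, List.drop_zero]
  cases hx : pvBreaks f1 b with
  | mk o b' =>
    cases hy : pvAccLoop rest1 b' with
    | mk o2 b2 => simp [hx, hy]

-- pieces after an invalid "#a+" stay literal
def pvInvalid (r : List Char) : Prop :=
  ∀ x a r', r = x :: a :: '#' :: 'a' :: '-' :: r' → pvAccA x a = none

theorem pvAccB_none_of_invalid {r f : List Char} (hf : f <+: r) (hinv : pvInvalid r) :
    pvAccB f = none := by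
  by_cases h5 : (f.drop 2).take 3 = ['#','a','-']
  · rcases f with _ | ⟨x, _ | ⟨a, _ | ⟨c2, _ | ⟨c3, _ | ⟨c4, f'⟩⟩⟩⟩⟩ <;> simp at h5
    obtain ⟨rfl, rfl, rfl⟩ := h5
    obtain ⟨z, rfl⟩ := hf
    rw [pvAccB_shape]
    exact hinv x a (f' ++ z) (by simp)
  · unfold pvAccB
    rw [if_neg h5]

theorem pvK_accI {r : List Char} (hinv : pvInvalid r) :
    ∀ b : Char, pvAccents (['#','a','+'] ++ r) b =
      (['#','a','+'] ++ (pvAccents r b).1, (pvAccents r b).2) := by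
  intro b
  have h1 := pvSplit_sep_prefix pvNeA r
  obtain ⟨f1, rest1, hft, hf⟩ := pvSplit_cons ['#','a','+'] pvNeA r
  rw [hft] at h1
  simp only [pvAccents, pvSplitA, h1, hft, pvBreaks_nil]
  rw [pvAccLoop]
  simp only [pvAccB_none_of_invalid hf hinv]
  cases hx : pvBreaks f1 b with
  | mk o b' =>
    cases hy : pvAccLoop rest1 b' with
    | mk o2 b2 => simp [hx, hy]

-- "#w" not followed by a sign at the toggles level
theorem pvK_litw {r : List Char}
    (h1 : r.take 1 ≠ ['+']) (h2 : r.take 1 ≠ ['.']) (h3 : r.take 1 ≠ ['-']) :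
    ∀ b : Char, pvToggles (['#','w'] ++ r) b =
      ('#' :: 'w' :: (pvToggles r b).1, (pvToggles r b).2) := by
  intro b
  have hsp := pvSplit_sep_prefix pvNeW r
  obtain ⟨f1, rest1, hft, hf⟩ := pvSplit_cons ['#','w'] pvNeW r
  rw [hft] at hsp
  simp only [pvToggles, pvSplitW, hsp, hft]
  rw [pvTogLoop]
  have g1 : ¬ f1.take 1 = ['+'] := fun h => h1 (pvTake1_prefix hf h)
  have g2 : ¬ f1.take 1 = ['.'] := fun h => h2 (pvTake1_prefix hf h)
  have g3 : ¬ f1.take 1 = ['-'] := fun h => h3 (pvTake1_prefix hf h)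
  simp only [g1, g2, g3, or_self, if_false, or_false, if_neg]
  cases hy : pvTogLoop rest1 b with
  | mk o2 b2 => simp [hy]

-- ===== the five escape steps, lifted to pvTop =====

theorem pvInvalid_mono {f r : List Char} (hf : f <+: r) (hinv : pvInvalid r) : pvInvalid f := by
  intro x a r' heq
  obtain ⟨z, rfl⟩ := hf
  exact hinv x a (r' ++ z) (by simp [heq])

theorem pvP_tog {c bn : Char} (hc : ((c = '+' ∨ c = '.') ∧ bn = ' ') ∨ (c = '-' ∧ bn = '\n'))
    (t : List Char) (b : Char) :
    pvTop (['#','w',c] ++ t) b = ((pvTop t bn).1, (pvTop t bn).2) := by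
  have hc1 : c ≠ '#' := by rcases hc with ⟨h | h, _⟩ | ⟨h, _⟩ <;> subst h <;> decide
  have hc2 : c ≠ '^' := by rcases hc with ⟨h | h, _⟩ | ⟨h, _⟩ <;> subst h <;> decide
  have := pvLift_acc_top (u := ['#','w',c]) (t := t) (e := fun _ => []) (σ := fun _ => bn)
    (by intro i hi; simp only [List.length_cons, List.length_nil] at hi
        interval_cases i <;> simp [List.isPrefixOf, hc1, Ne.symm hc1])
    (fun f bb hf => pvLift_brk_acc (e := fun _ => []) (σ := fun _ => bn)
      (by intro i hi; simp only [List.length_cons, List.length_nil] at hi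
          interval_cases i <;> simp [List.isPrefixOf, hc1, Ne.symm hc1])
      (fun g bb2 hg => pvLift_tog_brk (e := fun _ => []) (σ := fun _ => bn)
        (by intro i hi; simp only [List.length_cons, List.length_nil] at hi
            interval_cases i <;> simp [List.isPrefixOf, hc2, Ne.symm hc2])
        (fun w bb3 hw => pvK_tog hc w bb3) bb2) bb) b
  simpa using this

theorem pvP_brk (t : List Char) (b : Char) :
    pvTop (['^','b','r','e','a','k','^'] ++ t) b = (b :: (pvTop t b).1, (pvTop t b).2) := by
  have := pvLift_acc_top (u := ['^','b','r','e','a','k','^']) (t := t)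
    (e := fun bb => [bb]) (σ := fun bb => bb)
    (by intro i hi; simp only [List.length_cons, List.length_nil] at hi
        interval_cases i <;> simp [List.isPrefixOf])
    (fun f bb hf => pvLift_brk_acc (e := fun bb => [bb]) (σ := fun bb => bb)
      (by intro i hi; simp only [List.length_cons, List.length_nil] at hi
          interval_cases i <;> simp [List.isPrefixOf])
      (fun g bb2 hg => pvK_brk g bb2) bb) b
  simpa using this

theorem pvP_accV {x a m : Char} (hm : pvAccA x a = some m) (t : List Char) (b : Char) :
    pvTop (['#','a','+',x,a,'#','a','-'] ++ t) b = (m :: (pvTop t b).1, (pvTop t b).2) := by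
  obtain ⟨hx, ha⟩ := pvAccA_ne hm
  have := pvLift_acc_top (u := ['#','a','+',x,a,'#','a','-']) (t := t)
    (e := fun _ => [m]) (σ := fun bb => bb)
    (by intro i hi; simp only [List.length_cons, List.length_nil] at hi
        interval_cases i <;> simp [List.isPrefixOf, hx, ha, Ne.symm hx, Ne.symm ha])
    (fun f bb hf => pvK_accV hm f bb) b
  simpa using this

theorem pvP_accI {r : List Char} (hinv : pvInvalid r) (b : Char) :
    pvTop (['#','a','+'] ++ r) b = ('#' :: 'a' :: '+' :: (pvTop r b).1, (pvTop r b).2) := by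
  have := pvLift_acc_top (u := ['#','a','+']) (t := r)
    (e := fun _ => ['#','a','+']) (σ := fun bb => bb)
    (by intro i hi; simp only [List.length_cons, List.length_nil] at hi
        interval_cases i <;> simp [List.isPrefixOf])
    (fun f bb hf => pvK_accI (pvInvalid_mono hf hinv) bb) b
  simpa using this

theorem pvP_litw {r : List Char}
    (h1 : r.take 1 ≠ ['+']) (h2 : r.take 1 ≠ ['.']) (h3 : r.take 1 ≠ ['-'])
    (b : Char) :
    pvTop (['#','w'] ++ r) b = ('#' :: 'w' :: (pvTop r b).1, (pvTop r b).2) := by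
  have := pvLift_acc_top (u := ['#','w']) (t := r)
    (e := fun _ => ['#','w']) (σ := fun bb => bb)
    (by intro i hi; simp only [List.length_cons, List.length_nil] at hi
        interval_cases i <;> simp [List.isPrefixOf])
    (fun f bb hf => pvLift_brk_acc (e := fun _ => ['#','w']) (σ := fun bb => bb)
      (by intro i hi; simp only [List.length_cons, List.length_nil] at hi
          interval_cases i <;> simp [List.isPrefixOf])
      (fun g bb2 hg => pvLift_tog_brk (e := fun _ => ['#','w']) (σ := fun bb => bb)
        (by intro i hi; simp only [List.length_cons, List.length_nil] at hi
            interval_cases i <;> simp [List.isPrefixOf])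
        (fun w bb3 hw =>
          pvK_litw (fun h => h1 (pvTake1_prefix ((hw.trans hg).trans hf) h))
            (fun h => h2 (pvTake1_prefix ((hw.trans hg).trans hf) h))
            (fun h => h3 (pvTake1_prefix ((hw.trans hg).trans hf) h)) bb3) bb2) bb) b
  simpa using this

-- ===== A-side step facts =====

theorem pvScanA_default {c : Char} (t : List Char) (b : Char) (h1 : c ≠ '#') (h2 : c ≠ '^') :
    pvScanA (c :: t) b = c :: pvScanA t b := by
  rw [pvScanA.eq_def]
  split
  all_goals try (rename_i hq; obtain ⟨rfl, rfl⟩ := hq)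
  all_goals simp_all

theorem pvScanA_caret {t : List Char} (b : Char) (h : t.take 6 ≠ ['b','r','e','a','k','^']) :
    pvScanA ('^' :: t) b = '^' :: pvScanA t b := by
  rw [pvScanA.eq_def]
  split
  all_goals try (rename_i hq; obtain ⟨rfl, rfl⟩ := hq)
  all_goals simp_all

theorem pvScanA_acc_fail {r : List Char} (b : Char) (hinv : pvInvalid r) :
    pvScanA ('#' :: 'a' :: '+' :: r) b = '#' :: pvScanA ('a' :: '+' :: r) b := by
  rw [pvScanA.eq_def]
  split
  all_goals try (rename_i hq; obtain ⟨rfl, rfl⟩ := hq)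
  all_goals simp_all [pvInvalid]

theorem pvScanA_hash_w {r : List Char} (b : Char)
    (h1 : r.take 1 ≠ ['+']) (h2 : r.take 1 ≠ ['.']) (h3 : r.take 1 ≠ ['-']) :
    pvScanA ('#' :: 'w' :: r) b = '#' :: pvScanA ('w' :: r) b := by
  rw [pvScanA.eq_def]
  split
  all_goals try (rename_i hq; obtain ⟨rfl, rfl⟩ := hq)
  all_goals simp_all

theorem pvScanA_hash_a {t2 : List Char} (b : Char) (h : t2.take 1 ≠ ['+']) :
    pvScanA ('#' :: 'a' :: t2) b = '#' :: pvScanA ('a' :: t2) b := by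
  rw [pvScanA.eq_def]
  split
  all_goals try (rename_i hq; obtain ⟨rfl, rfl⟩ := hq)
  all_goals simp_all

theorem pvScanA_hash_other {c2 : Char} (t2 : List Char) (b : Char)
    (hh : c2 ≠ '#') (ha : c2 ≠ 'a') (hw : c2 ≠ 'w') :
    pvScanA ('#' :: c2 :: t2) b = '#' :: pvScanA (c2 :: t2) b := by
  rw [pvScanA.eq_def]
  split
  all_goals try (rename_i hq; obtain ⟨rfl, rfl⟩ := hq)
  all_goals simp_all

theorem pvScanA_hash_nil (b : Char) : pvScanA ['#'] b = ['#'] := by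
  rw [pvScanA.eq_def]
  simp [pvScanA]

-- ===== shape helpers =====

theorem pvTake6_shape {t : List Char} (h : t.take 6 = ['b','r','e','a','k','^']) :
    ∃ t', t = 'b' :: 'r' :: 'e' :: 'a' :: 'k' :: '^' :: t' := by
  rcases t with _ | ⟨a1, _ | ⟨a2, _ | ⟨a3, _ | ⟨a4, _ | ⟨a5, _ | ⟨a6, t'⟩⟩⟩⟩⟩⟩ <;>
    simp only [List.take, List.cons.injEq] at h
  · cases h
  · exact absurd h (by simp)
  · exact absurd h (by simp)
  · exact absurd h (by simp)
  · exact absurd h (by simp)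
  · exact absurd h (by simp)
  · obtain ⟨rfl, rfl, rfl, rfl, rfl, rfl, -⟩ := h
    exact ⟨t', rfl⟩

theorem pvShape_or_invalid (r : List Char) :
    (∃ x a r' m, r = x :: a :: '#' :: 'a' :: '-' :: r' ∧ pvAccA x a = some m) ∨ pvInvalid r := by
  rcases r with _ | ⟨x, _ | ⟨a, _ | ⟨c2, _ | ⟨c3, _ | ⟨c4, r'⟩⟩⟩⟩⟩
  · right; intro x a r' h; cases h
  · right; intro x' a' r'' h; cases h
  · right; intro x' a' r'' h; cases h
  · right; intro x' a' r'' h; cases h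
  · right; intro x' a' r'' h; cases h
  · by_cases hsh : c2 = '#' ∧ c3 = 'a' ∧ c4 = '-'
    · obtain ⟨rfl, rfl, rfl⟩ := hsh
      cases hm : pvAccA x a with
      | some m => exact Or.inl ⟨x, a, r', m, rfl, hm⟩
      | none =>
        right
        intro x' a' r'' h
        simp only [List.cons.injEq] at h
        obtain ⟨rfl, rfl, -, -, -, rfl⟩ := h
        exact hm
    · right
      intro x' a' r'' h
      simp only [List.cons.injEq] at h
      exact absurd ⟨h.2.2.1, h.2.2.2.1, h.2.2.2.2.1⟩ hsh

-- single literal character, at the top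
theorem pvP_lit1 {c : Char} {t : List Char} (b : Char)
    (hH : ¬ (['#','#'] : List Char).isPrefixOf (c :: t))
    (hA : ¬ (['#','a','+'] : List Char).isPrefixOf (c :: t))
    (hB : ¬ (['^','b','r','e','a','k','^'] : List Char).isPrefixOf (c :: t))
    (hW : ¬ (['#','w'] : List Char).isPrefixOf (c :: t)) :
    pvTop (c :: t) b = (c :: (pvTop t b).1, (pvTop t b).2) := by
  have blk : ∀ (sep : List Char), ¬ sep.isPrefixOf (c :: t) →
      ∀ i < ([c] : List Char).length, ¬ sep.isPrefixOf (([c] ++ t).drop i) := by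
    intro sep hsep i hi
    simp only [List.length_cons, List.length_nil] at hi
    interval_cases i
    simpa using hsep
  have := pvP_lit (u := [c]) (t := t) b (blk _ hH) (blk _ hA) (blk _ hB) (blk _ hW)
  simpa using this

-- ===== the main equivalence =====

theorem pvMain : ∀ (n : ℕ) (s : List Char) (b : Char), s.length ≤ n →
    (pvTop s b).1 = pvScanA s b := by
  intro n
  induction n with
  | zero =>
    intro s b hs
    obtain rfl : s = [] := List.length_eq_zero_iff.mp (Nat.le_zero.mp hs)
    simp [pvTop_nil, pvScanA]
  | succ n ih =>
    intro s b hs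
    cases s with
    | nil => simp [pvTop_nil, pvScanA]
    | cons c t =>
      simp only [List.length_cons] at hs
      have ht : t.length ≤ n := by omega
      by_cases hc : c = '#'
      · subst hc
        cases t with
        | nil =>
          rw [pvP_lit1 b (by simp [List.isPrefixOf]) (by simp [List.isPrefixOf])
            (by simp [List.isPrefixOf]) (by simp [List.isPrefixOf])]
          simp [pvScanA_hash_nil, pvTop_nil]
        | cons c2 t2 =>
          have ht2 : t2.length ≤ n := by simp at ht; omega
          by_cases hc2 : c2 = '#'
          · subst hc2
            have hP := pvP_hash t2 b
            simp only [List.cons_append, List.nil_append] at hP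
            rw [hP]
            simp only [pvScanA]
            exact congrArg (List.cons '#') (ih t2 b ht2)
          · by_cases hca : c2 = 'a'
            · subst hca
              rcases t2 with _ | ⟨c3, t3⟩
              · rw [pvP_lit1 b (by simp [List.isPrefixOf]) (by simp [List.isPrefixOf])
                  (by simp [List.isPrefixOf]) (by simp [List.isPrefixOf])]
                rw [pvScanA_hash_a b (by simp)]
                refine congrArg (List.cons '#') ?_
                rw [pvP_lit1 b (by simp [List.isPrefixOf]) (by simp [List.isPrefixOf])
                  (by simp [List.isPrefixOf]) (by simp [List.isPrefixOf])]
                rw [pvScanA_default [] b (by decide) (by decide)]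
                simp [pvTop_nil, pvScanA]
              · have ht3 : t3.length ≤ n := by simp at ht; omega
                by_cases hc3 : c3 = '+'
                · subst hc3
                  rcases pvShape_or_invalid t3 with ⟨x, aa, r', m, rfl, hm⟩ | hinv
                  · have hr' : r'.length ≤ n := by simp at ht3; omega
                    have hP := pvP_accV hm r' b
                    simp only [List.cons_append, List.nil_append] at hP
                    rw [hP]
                    simp only [pvScanA, hm]
                    exact congrArg (List.cons m) (ih r' b hr')
                  · have hP := pvP_accI hinv b
                    simp only [List.cons_append, List.nil_append] at hP
                    rw [hP]
                    rw [pvScanA_acc_fail b hinv]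
                    rw [pvScanA_default ('+' :: t3) b (by decide) (by decide)]
                    rw [pvScanA_default t3 b (by decide) (by decide)]
                    exact congrArg _ (congrArg _ (congrArg _ (ih t3 b ht3)))
                · rw [pvP_lit1 b (by simp [List.isPrefixOf])
                    (by simp [List.isPrefixOf, hc3, Ne.symm hc3])
                    (by simp [List.isPrefixOf]) (by simp [List.isPrefixOf])]
                  rw [pvScanA_hash_a b (by simp [hc3])]
                  exact congrArg (List.cons '#') (ih ('a' :: c3 :: t3) b (by simpa using ht))
            · by_cases hcw : c2 = 'w'
              · subst hcw
                by_cases hp : t2.take 1 = ['+']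
                · obtain ⟨t3, rfl⟩ : ∃ t3, t2 = '+' :: t3 := by
                    rcases t2 with _ | ⟨d, t3⟩ <;> simp at hp
                    exact ⟨t3, by rw [hp]⟩
                  have hP := pvP_tog (c := '+') (bn := ' ') (by simp) t3 b
                  simp only [List.cons_append, List.nil_append] at hP
                  rw [hP]
                  simp only [pvScanA]
                  exact ih t3 ' ' (by simp at ht; omega)
                · by_cases hd : t2.take 1 = ['.']
                  · obtain ⟨t3, rfl⟩ : ∃ t3, t2 = '.' :: t3 := by
                      rcases t2 with _ | ⟨d, t3⟩ <;> simp at hd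
                      exact ⟨t3, by rw [hd]⟩
                    have hP := pvP_tog (c := '.') (bn := ' ') (by simp) t3 b
                    simp only [List.cons_append, List.nil_append] at hP
                    rw [hP]
                    simp only [pvScanA]
                    exact ih t3 ' ' (by simp at ht; omega)
                  · by_cases hmn : t2.take 1 = ['-']
                    · obtain ⟨t3, rfl⟩ : ∃ t3, t2 = '-' :: t3 := by
                        rcases t2 with _ | ⟨d, t3⟩ <;> simp at hmn
                        exact ⟨t3, by rw [hmn]⟩
                      have hP := pvP_tog (c := '-') (bn := '\n') (by simp) t3 b
                      simp only [List.cons_append, List.nil_append] at hP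
                      rw [hP]
                      simp only [pvScanA]
                      exact ih t3 '\n' (by simp at ht; omega)
                    · have hP := pvP_litw hp hd hmn b
                      simp only [List.cons_append, List.nil_append] at hP
                      rw [hP]
                      rw [pvScanA_hash_w b hp hd hmn]
                      rw [pvScanA_default t2 b (by decide) (by decide)]
                      exact congrArg _ (congrArg _ (ih t2 b ht2))
              · rw [pvP_lit1 b (by simp [List.isPrefixOf, hc2, Ne.symm hc2])
                  (by simp [List.isPrefixOf, hca, Ne.symm hca])
                  (by simp [List.isPrefixOf])
                  (by simp [List.isPrefixOf, hcw, Ne.symm hcw])]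
                rw [pvScanA_hash_other t2 b hc2 hca hcw]
                exact congrArg (List.cons '#') (ih (c2 :: t2) b (by simpa using ht))
      · by_cases hk : c = '^'
        · subst hk
          by_cases htb : t.take 6 = ['b','r','e','a','k','^']
          · obtain ⟨t', rfl⟩ := pvTake6_shape htb
            have hP := pvP_brk t' b
            simp only [List.cons_append, List.nil_append] at hP
            rw [hP]
            simp only [pvScanA]
            exact congrArg (List.cons b) (ih t' b (by simp at ht; omega))
          · rw [pvP_lit1 b (by simp [List.isPrefixOf]) (by simp [List.isPrefixOf])
              (by intro hpf
                  obtain ⟨z, hz⟩ := List.isPrefixOf_iff_prefix.mp hpf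
                  simp only [List.cons_append, List.cons.injEq] at hz
                  apply htb
                  rw [← hz.2]
                  simp)
              (by simp [List.isPrefixOf])]
            rw [pvScanA_caret b htb]
            exact congrArg (List.cons '^') (ih t b ht)
        · rw [pvP_lit1 b (by simp [List.isPrefixOf, hc, Ne.symm hc])
            (by simp [List.isPrefixOf, hc, Ne.symm hc])
            (by simp [List.isPrefixOf, hk, Ne.symm hk])
            (by simp [List.isPrefixOf, hc, Ne.symm hc])]
          rw [pvScanA_default t b hc hk]
          exact congrArg (List.cons c) (ih t b ht)

-- ===== VERDICT (by name: the statement is the Claim_ definition above) =====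
theorem parse_text_escapes_spec : Claim_equal_parse_text_escapes := by
  intro s _
  unfold Spec_parse_text_escapes parse_text_escapes parse_text_escapes_alt
  exact congrArg String.mk (pvMain s.toList.length s.toList ' ' le_rfl).symm
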